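-- pv_equiv track=rewrite | github.com/fudu69/perso | upload_on_youtube.py | trim_tags
-- ===== SOURCE A (Python) =====
-- from typing import List, Tuple
--
-- def trim_tags(tags: List[str]) -> List[str]:
--     total, out = 0, []
--     for t in tags:
--         l = len(t)
--         if total + l + 1 > 500:  # +1 pour le séparateur compté par l’API
--             break
--         out.append(t)
--         total += l + 1
--     return out
-- ===== SOURCE B (Python) =====
-- from typing import List
--
-- def trim_tags(tags: List[str]) -> List[str]:
--     # Build a prefix-sum table of the API sizes (len + 1 separator), then
--     # binary-search (bisect_right against 500) for the longest admissible prefix.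
--     cum = []
--     s = 0
--     for t in tags:
--         s += len(t) + 1
--         cum.append(s)
--     lo, hi = 0, len(cum)
--     while lo < hi:
--         mid = (lo + hi) // 2
--         if 500 < cum[mid]:
--             hi = mid
--         else:
--             lo = mid + 1
--     return tags[:lo]
-- ===== Notes on version B (the rewrite author's own statement) =====
-- stated objective: alternative
-- what changed: Replaces the running-total scan with early break by a prefix-sum table plus a bisect_right-style binary search for the cut point, returning tags[:k].
import Mathlib
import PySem

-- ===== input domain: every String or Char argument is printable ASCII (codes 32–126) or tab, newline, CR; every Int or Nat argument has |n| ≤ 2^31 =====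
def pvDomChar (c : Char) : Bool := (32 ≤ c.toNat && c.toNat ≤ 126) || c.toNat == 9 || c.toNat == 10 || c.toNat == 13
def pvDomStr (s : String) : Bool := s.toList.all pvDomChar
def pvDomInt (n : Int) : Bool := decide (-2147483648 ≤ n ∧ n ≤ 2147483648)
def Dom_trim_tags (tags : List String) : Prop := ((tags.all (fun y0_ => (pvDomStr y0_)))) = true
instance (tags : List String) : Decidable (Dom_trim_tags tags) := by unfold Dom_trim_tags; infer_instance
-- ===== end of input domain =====

-- B replaces A's running-total scan (early break) by a prefix-sum table plus a
-- bisect_right-style binary search for the cut point: an alternative decomposition, not faster.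

-- ===== PORT A =====
-- the for-loop of A: state (total, out), break ported as returning out
def trimGo : List String → Int → List String → List String
  | [], _, out => out
  | t :: ts, total, out =>
    if total + PySem.Str.len t + 1 > 500 then out
    else trimGo ts (total + PySem.Str.len t + 1) (out ++ [t])

def trim_tags (tags : List String) : List String := trimGo tags 0 []

-- ===== PORT B =====
-- Source B's first loop: builds (cum, s) exactly as the Python appends running sums
def cumTable (tags : List String) : List Int × Int :=
  tags.foldl (fun p t => (p.1 ++ [p.2 + PySem.Str.len t + 1], p.2 + PySem.Str.len t + 1)) ([], 0)

-- Source B's hand-written bisect_right loop (lo/hi, mid = (lo+hi)//2); cum[mid] is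
-- always in range in the Python loop, so getD is exact there
def bsr (cum : List Int) (lo hi : Nat) : Nat :=
  if h : lo < hi then
    let mid := (lo + hi) / 2
    if 500 < cum.getD mid 0 then bsr cum lo mid
    else bsr cum (mid + 1) hi
  else lo
termination_by hi - lo
decreasing_by all_goals omega

def trim_tags_alt (tags : List String) : List String :=
  let cum := (cumTable tags).1
  PySem.List.slice tags none (some ((bsr cum 0 cum.length : Nat) : Int))

-- ===== PRECONDITION & SPEC =====
def Spec_trim_tags (tags : List String) (out : List String) : Prop := out = trim_tags_alt tags
instance (tags : List String) (out : List String) : Decidable (Spec_trim_tags tags out) := by unfold Spec_trim_tags; infer_instance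

-- ===== CLAIM (what is proved, stated in full; the proofs are below) =====
def Claim_equal_trim_tags : Prop := ∀ (tags : List String), Dom_trim_tags tags → Spec_trim_tags tags (trim_tags tags)

-- ===== LEMMAS AND PROOFS =====

-- number of tags A keeps when starting from running total s
def cnt : List String → Int → Nat
  | [], _ => 0
  | t :: ts, s => if s + PySem.Str.len t + 1 > 500 then 0 else cnt ts (s + PySem.Str.len t + 1) + 1

-- the prefix sums Source B's first loop produces, starting from s
def psums : List String → Int → List Int
  | [], _ => []
  | t :: ts, s => (s + PySem.Str.len t + 1) :: psums ts (s + PySem.Str.len t + 1)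

theorem trimGo_eq_take (ts : List String) : ∀ (s : Int) (out : List String),
    trimGo ts s out = out ++ ts.take (cnt ts s) := by
  induction ts with
  | nil => intro s out; simp [trimGo, cnt]
  | cons t ts ih =>
    intro s out
    simp only [trimGo, cnt]
    split_ifs with h
    · simp
    · rw [ih]; simp

theorem cumTable_fst (ts : List String) : ∀ (acc : List Int) (s : Int),
    (ts.foldl (fun p t => (p.1 ++ [p.2 + PySem.Str.len t + 1], p.2 + PySem.Str.len t + 1))
      (acc, s)).1 = acc ++ psums ts s := by
  induction ts with
  | nil => intro acc s; simp [psums]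
  | cons t ts ih =>
    intro acc s
    simp only [List.foldl_cons]
    rw [ih]
    simp [psums]

theorem psums_length (ts : List String) : ∀ s : Int, (psums ts s).length = ts.length := by
  induction ts with
  | nil => intro s; simp [psums]
  | cons t ts ih => intro s; simp [psums, ih]

theorem cnt_le_length (ts : List String) : ∀ s : Int, cnt ts s ≤ ts.length := by
  induction ts with
  | nil => intro s; simp [cnt]
  | cons t ts ih =>
    intro s
    simp only [cnt, List.length_cons]
    split_ifs with h
    · omega
    · have := ih (s + PySem.Str.len t + 1); omega

theorem psums_mem_ge (ts : List String) : ∀ (s : Int) (x : Int), x ∈ psums ts s → s + 1 ≤ x := by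
  induction ts with
  | nil => intro s x hx; simp [psums] at hx
  | cons t ts ih =>
    intro s x hx
    have hlen : (0 : Int) ≤ PySem.Str.len t := by
      rw [PySem.Str.len_eq]; exact Int.natCast_nonneg _
    simp only [psums, List.mem_cons] at hx
    rcases hx with h | h
    · omega
    · have := ih _ _ h; omega

theorem psums_char (ts : List String) : ∀ (s : Int) (i : Nat), i < ts.length →
    ((psums ts s).getD i 0 ≤ 500 ↔ i < cnt ts s) := by
  induction ts with
  | nil => intro s i hi; simp at hi
  | cons t ts ih =>
    intro s i hi
    by_cases h : s + PySem.Str.len t + 1 > 500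
    · -- head already overflows: cnt = 0 and every entry is > 500
      simp only [cnt, if_pos h]
      constructor
      · intro hle
        exfalso
        cases i with
        | zero => simp only [psums, List.getD_cons_zero] at hle; omega
        | succ j =>
          simp only [psums, List.getD_cons_succ] at hle
          have hj : j < ts.length := by simpa using Nat.lt_of_succ_lt_succ hi
          have hjlen : j < (psums ts (s + PySem.Str.len t + 1)).length := by
            rw [psums_length]; exact hj
          rw [List.getD_eq_getElem _ _ hjlen] at hle
          have hmem := List.getElem_mem hjlen
          have := psums_mem_ge ts (s + PySem.Str.len t + 1) _ hmem
          omega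
      · intro hlt; omega
    · simp only [cnt, if_neg h]
      cases i with
      | zero =>
        simp only [psums, List.getD_cons_zero]
        constructor
        · intro _; omega
        · intro _; omega
      | succ j =>
        simp only [psums, List.getD_cons_succ]
        have hj : j < ts.length := by simpa using Nat.lt_of_succ_lt_succ hi
        rw [ih _ j hj]
        omega

theorem bsr_eq (cum : List Int) (K : Nat)
    (hcar : ∀ i, i < cum.length → (cum.getD i 0 ≤ 500 ↔ i < K)) :
    ∀ (n lo hi : Nat), hi - lo ≤ n → lo ≤ K → K ≤ hi → hi ≤ cum.length → bsr cum lo hi = K := by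
  intro n
  induction n with
  | zero =>
    intro lo hi hfuel hlo hhi hlen
    rw [bsr]
    have : ¬ lo < hi := by omega
    rw [dif_neg this]; omega
  | succ n ih =>
    intro lo hi hfuel hlo hhi hlen
    rw [bsr]
    by_cases h : lo < hi
    · rw [dif_pos h]
      have hmid1 : lo ≤ (lo + hi) / 2 := by omega
      have hmid2 : (lo + hi) / 2 < hi := by omega
      have hmidlen : (lo + hi) / 2 < cum.length := by omega
      by_cases hc : 500 < cum.getD ((lo + hi) / 2) 0
      · rw [if_pos hc]
        have hK : K ≤ (lo + hi) / 2 := by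
          by_contra hK
          have := (hcar _ hmidlen).mpr (by omega)
          omega
        exact ih lo ((lo + hi) / 2) (by omega) hlo hK (by omega)
      · rw [if_neg hc]
        have hK : (lo + hi) / 2 < K := (hcar _ hmidlen).mp (by omega)
        exact ih ((lo + hi) / 2 + 1) hi (by omega) (by omega) hhi hlen
    · rw [dif_neg h]; omega

-- ===== VERDICT (by name: the statement is the Claim_ definition above) =====
theorem trim_tags_spec : Claim_equal_trim_tags := by
  intro tags _
  unfold Spec_trim_tags trim_tags trim_tags_alt cumTable
  rw [cumTable_fst tags [] 0]
  simp only [List.nil_append]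
  have hlen : (psums tags 0).length = tags.length := psums_length tags 0
  have hbsr : bsr (psums tags 0) 0 (psums tags 0).length = cnt tags 0 := by
    apply bsr_eq (psums tags 0) (cnt tags 0)
      (fun i hi => psums_char tags 0 i (by omega)) (psums tags 0).length 0 (psums tags 0).length
      (by omega) (by omega) (by rw [hlen]; exact cnt_le_length tags 0) (by omega)
  rw [hbsr, PySem.List.slice_to_natCast, trimGo_eq_take]
  simp
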